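-- pv_equiv track=rewrite | github.com/aimclub/documentor | experiments1/metrics/merge_scanned_with_pdf_annotations.py | match_elements_by_type_and_order
-- ===== SOURCE A (Python) =====
-- from typing import Dict, List, Any, Optional
--
-- def match_elements_by_type_and_order(
--     scanned_elements: List[Dict[str, Any]],
--     pdf_elements: List[Dict[str, Any]]
-- ) -> Dict[str, str]:
--     """
--     Сопоставляет элементы по типу и порядку.
--
--     Args:
--         scanned_elements: Элементы из scanned аннотации
--         pdf_elements: Элементы из PDF аннотации
--
--     Returns:
--         Dict mapping scanned_element_id -> pdf_element_id
--     """
--     matches = {}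
--     used_pdf_ids = set()
--
--     # Группируем по типу
--     scanned_by_type = {}
--     for elem in scanned_elements:
--         elem_type = elem.get('type', '').lower()
--         if elem_type not in scanned_by_type:
--             scanned_by_type[elem_type] = []
--         scanned_by_type[elem_type].append(elem)
--
--     pdf_by_type = {}
--     for elem in pdf_elements:
--         elem_type = elem.get('type', '').lower()
--         if elem_type not in pdf_by_type:
--             pdf_by_type[elem_type] = []
--         pdf_by_type[elem_type].append(elem)
--
--     # Сопоставляем элементы каждого типа по порядку
--     for elem_type, scanned_elems in scanned_by_type.items():
--         if elem_type not in pdf_by_type: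
--             continue
--
--         scanned_sorted = sorted(scanned_elems, key=lambda e: e.get('order', 0))
--         pdf_sorted = sorted(pdf_by_type[elem_type], key=lambda e: e.get('order', 0))
--
--         min_len = min(len(scanned_sorted), len(pdf_sorted))
--         for i in range(min_len):
--             scanned_id = scanned_sorted[i].get('id')
--             pdf_id = pdf_sorted[i].get('id')
--
--             if scanned_id and pdf_id and pdf_id not in used_pdf_ids:
--                 matches[scanned_id] = pdf_id
--                 used_pdf_ids.add(pdf_id)
--
--     return matches
-- ===== SOURCE B (Python) =====
-- def match_elements_by_type_and_order(scanned_elements, pdf_elements):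
--     def ty(e):
--         return e.get('type', '').lower()
--
--     # one grouping pass over the pdf side only
--     pdf_runs = {}
--     for e in pdf_elements:
--         pdf_runs.setdefault(ty(e), []).append(e)
--
--     matches = {}
--     used = set()
--     seen_types = set()
--     # stream the scanned side, handling each type once, at its first appearance
--     for e in scanned_elements:
--         t = ty(e)
--         if t in seen_types or t not in pdf_runs:
--             seen_types.add(t)
--             continue
--         seen_types.add(t)
--         srun = sorted([x for x in scanned_elements if ty(x) == t],
--                       key=lambda x: x.get('order', 0))
--         prun = sorted(pdf_runs[t], key=lambda x: x.get('order', 0))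
--         for s, p in zip(srun, prun):
--             sid, pid = s.get('id'), p.get('id')
--             if sid and pid and pid not in used:
--                 matches[sid] = pid
--                 used.add(pid)
--     return matches
-- ===== Notes on version B (the rewrite author's own statement) =====
-- stated objective: alternative
-- what changed: B replaces A's two grouping dicts and index loop over dict items by a single pdf grouping pass plus a stream over scanned elements with a seen-types set, each type's runs obtained at first appearance and matched by zipping the two sorted runs instead of indexing with range(min_len).
import Mathlib
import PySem

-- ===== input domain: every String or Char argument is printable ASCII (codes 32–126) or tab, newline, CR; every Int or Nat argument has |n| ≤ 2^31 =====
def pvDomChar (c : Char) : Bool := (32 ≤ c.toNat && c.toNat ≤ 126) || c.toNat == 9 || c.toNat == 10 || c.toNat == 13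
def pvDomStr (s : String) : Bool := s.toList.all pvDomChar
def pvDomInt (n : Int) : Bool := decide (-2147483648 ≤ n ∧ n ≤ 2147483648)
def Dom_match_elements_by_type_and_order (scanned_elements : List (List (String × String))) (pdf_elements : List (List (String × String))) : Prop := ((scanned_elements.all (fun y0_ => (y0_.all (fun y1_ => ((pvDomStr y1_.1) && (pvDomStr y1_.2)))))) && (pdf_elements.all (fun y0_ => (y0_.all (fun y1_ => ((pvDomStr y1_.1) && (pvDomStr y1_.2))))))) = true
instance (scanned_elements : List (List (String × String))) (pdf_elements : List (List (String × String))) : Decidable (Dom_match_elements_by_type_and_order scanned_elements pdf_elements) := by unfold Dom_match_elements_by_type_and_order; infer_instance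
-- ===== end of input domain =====

-- B is an alternative decomposition of A (one grouping pass over the pdf side only; the
-- scanned side is streamed with a seen-types set, per-type runs matched by zipping), same cost.

-- shared helper lines of both Pythons: elem.get(k, default), elem.get('type','').lower()
def pvGet (e : List (String × String)) (k : String) : Option String :=
  (e.find? (fun q => q.1 == k)).map (fun q => q.2)

def pvTy (e : List (String × String)) : String :=
  PySem.Str.lower ((pvGet e "type").getD "")

-- e.get('order', 0) as a sort key: exact on Pre_ (each sorted group is homogeneous in
-- 'order'-presence, so the all-absent case is an all-equal key — like Python's all-0 — and
-- the all-present case compares the ASCII strings exactly as Python does)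
def pvKey (e : List (String × String)) : String := (pvGet e "order").getD ""

def pvTruthy (o : Option String) : Bool := (o.getD "") ≠ ""

-- the shared body 'if scanned_id and pdf_id and pdf_id not in used_pdf_ids: …' of both Pythons
def pvPair (st : PySem.Dict String String × PySem.Set String)
    (se pe : List (String × String)) : PySem.Dict String String × PySem.Set String :=
  let sid := pvGet se "id"
  let pid := pvGet pe "id"
  if pvTruthy sid && pvTruthy pid && !(PySem.Set.contains st.2 (pid.getD "")) then
    (st.1.insert (sid.getD "") (pid.getD ""), PySem.Set.add st.2 (pid.getD ""))
  else st

-- ===== PORT A =====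
-- A's grouping loop: if t not in d: d[t] = []; d[t].append(e)
def pvGroupA (elems : List (List (String × String))) :
    PySem.Dict String (List (List (String × String))) :=
  elems.foldl (fun d e =>
    let t := pvTy e
    let d := if d.contains t then d else d.insert t ([] : List (List (String × String)))
    d.modify t [] (fun l => l ++ [e])) PySem.Dict.empty

def match_elements_by_type_and_order (scanned_elements : List (List (String × String))) (pdf_elements : List (List (String × String))) : List (String × String) :=
  let sbt := pvGroupA scanned_elements
  let pbt := pvGroupA pdf_elements
  let st := sbt.items.foldl (fun st it =>
    if pbt.contains it.1 = false then st
    else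
      let ss := PySem.List.sorted it.2 pvKey
      let ps := PySem.List.sorted (pbt.getD it.1 []) pvKey
      (PySem.List.pyRange 0 (min (ss.length : Int) (ps.length : Int)) 1).foldl
        (fun st i => pvPair st (PySem.List.pyGetD ss i []) (PySem.List.pyGetD ps i [])) st)
    ((PySem.Dict.empty, PySem.Set.empty) : PySem.Dict String String × PySem.Set String)
  st.1.items

-- ===== PORT B =====
def match_elements_by_type_and_order_alt (scanned_elements : List (List (String × String))) (pdf_elements : List (List (String × String))) : List (String × String) :=
  -- pdf_runs.setdefault(ty(e), []).append(e)  (setdefault-then-append = modify in place)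
  let pdfRuns := pdf_elements.foldl
    (fun d e => d.modify (pvTy e) ([] : List (List (String × String))) (fun l => l ++ [e]))
    PySem.Dict.empty
  let st := scanned_elements.foldl
    (fun (st : (PySem.Dict String String × PySem.Set String) × PySem.Set String) e =>
      let t := pvTy e
      if PySem.Set.contains st.2 t || !(pdfRuns.contains t) then (st.1, PySem.Set.add st.2 t)
      else
        let srun := PySem.List.sorted (scanned_elements.filter (fun x => pvTy x == t)) pvKey
        let prun := PySem.List.sorted (pdfRuns.getD t []) pvKey
        ((srun.zip prun).foldl (fun mu sp => pvPair mu sp.1 sp.2) st.1, PySem.Set.add st.2 t))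
    (((PySem.Dict.empty, PySem.Set.empty) : PySem.Dict String String × PySem.Set String),
      (PySem.Set.empty : PySem.Set String))
  st.1.1.items

-- ===== PRECONDITION & SPEC =====
def pvHasOrd (e : List (String × String)) : Bool := (pvGet e "order").isSome

-- Pre_ excludes exactly the inputs on which Python A raises TypeError: a type present on both
-- sides whose scanned (or pdf) group mixes elements with and without an 'order' key, so that
-- sorted() compares an int 0 with a str (B raises there too).
def Pre_match_elements_by_type_and_order (scanned_elements : List (List (String × String))) (pdf_elements : List (List (String × String))) : Prop :=
  (∀ e1 ∈ scanned_elements, ∀ e2 ∈ scanned_elements, pvTy e1 = pvTy e2 →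
      (∃ q ∈ pdf_elements, pvTy q = pvTy e1) → pvHasOrd e1 = pvHasOrd e2) ∧
  (∀ q1 ∈ pdf_elements, ∀ q2 ∈ pdf_elements, pvTy q1 = pvTy q2 →
      (∃ e ∈ scanned_elements, pvTy e = pvTy q1) → pvHasOrd q1 = pvHasOrd q2)

instance (scanned_elements : List (List (String × String))) (pdf_elements : List (List (String × String))) : Decidable (Pre_match_elements_by_type_and_order scanned_elements pdf_elements) := by
  unfold Pre_match_elements_by_type_and_order; infer_instance

def pvWitness_match_elements_by_type_and_order : (List (List (String × String))) × (List (List (String × String))) :=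
  ([[("type", "T"), ("order", "1"), ("id", "s1")], [("type", "t"), ("order", "2"), ("id", "s2")]],
   [[("type", "t"), ("order", "2"), ("id", "p1")]])

def Spec_match_elements_by_type_and_order (scanned_elements : List (List (String × String))) (pdf_elements : List (List (String × String))) (out : List (String × String)) : Prop := out = match_elements_by_type_and_order_alt scanned_elements pdf_elements
instance (scanned_elements : List (List (String × String))) (pdf_elements : List (List (String × String))) (out : List (String × String)) : Decidable (Spec_match_elements_by_type_and_order scanned_elements pdf_elements out) := by unfold Spec_match_elements_by_type_and_order; infer_instance

-- ===== CLAIM (what is proved, stated in full; the proofs are below) =====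
def Claim_equal_match_elements_by_type_and_order : Prop := ∀ (scanned_elements : List (List (String × String))) (pdf_elements : List (List (String × String))), Dom_match_elements_by_type_and_order scanned_elements pdf_elements → Pre_match_elements_by_type_and_order scanned_elements pdf_elements → Spec_match_elements_by_type_and_order scanned_elements pdf_elements (match_elements_by_type_and_order scanned_elements pdf_elements)


-- ===== LEMMAS AND PROOFS =====

-- the grouping fold without A's redundant 'if t not in d: d[t] = []' step
def pvPlain (elems : List (List (String × String))) :
    PySem.Dict String (List (List (String × String))) :=
  elems.foldl (fun d e => d.modify (pvTy e) ([] : List (List (String × String))) (fun l => l ++ [e]))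
    PySem.Dict.empty

-- the per-type matching step both ports reduce to
def pvStep (scanned_elements pdf_elements : List (List (String × String)))
    (st : PySem.Dict String String × PySem.Set String) (t : String) :
    PySem.Dict String String × PySem.Set String :=
  if (pvPlain pdf_elements).contains t = false then st
  else
    ((PySem.List.sorted (scanned_elements.filter (fun x => pvTy x == t)) pvKey).zip
        (PySem.List.sorted ((pvPlain pdf_elements).getD t []) pvKey)).foldl
      (fun mu sp => pvPair mu sp.1 sp.2) st

-- first occurrences of xs not already in seen, in order
def pvNew (xs : List String) (seen : PySem.Set String) : List String :=
  match xs with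
  | [] => []
  | t :: r => if PySem.Set.contains seen t then pvNew r seen else t :: pvNew r (PySem.Set.add seen t)

lemma pvKeyNe {ν : Type} (d : PySem.Dict String ν) (t : String) (h : d.contains t = false) :
    ∀ p ∈ d.items, (p.1 == t) = false := by
  intro p hp
  by_contra hbt
  simp only [Bool.not_eq_false, beq_iff_eq] at hbt
  have : d.contains t = true := by
    simp only [PySem.Dict.contains, List.any_eq_true]
    exact ⟨p, hp, by simp [hbt]⟩
  simp [this] at h

lemma pvModify_absorb {ν : Type} (d : PySem.Dict String ν) (t : String) (v0 : ν) (f : ν → ν) :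
    ((if d.contains t then d else d.insert t v0).modify t v0 f) = d.modify t v0 f := by
  by_cases h : d.contains t = true
  · simp [h]
  · rw [if_neg h]
    simp only [Bool.not_eq_true] at h
    apply PySem.Dict.ext
    simp only [PySem.Dict.modify, PySem.Dict.getD_insert_self,
      PySem.Dict.getD_of_not_contains d v0 h]
    rw [PySem.Dict.items_insert_of_contains _ _ (PySem.Dict.contains_insert_self d t v0),
      PySem.Dict.items_insert_of_not_contains d (f v0) h,
      PySem.Dict.items_insert_of_not_contains d v0 h, List.map_append]
    have := pvKeyNe d t h
    rw [List.map_congr_left (fun p hp => by simp [this p hp] :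
      ∀ p ∈ d.items, (if (p.1 == t) = true then (t, f v0) else p) = p)]
    simp

lemma pvGroupA_eq_plain (elems : List (List (String × String))) :
    pvGroupA elems = pvPlain elems := by
  unfold pvGroupA pvPlain
  exact PySem.List.foldl_congr_mem _ _ _ _ (fun d e _ => pvModify_absorb d (pvTy e) [] _)

lemma pvPlain_getD (elems : List (List (String × String))) (c : String) :
    (pvPlain elems).getD c [] = elems.filter (fun e => pvTy e == c) := by
  unfold pvPlain
  rw [show (elems.foldl (fun d e => d.modify (pvTy e) ([] : List (List (String × String))) (fun l => l ++ [e])) PySem.Dict.empty)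
      = ((elems.map (fun e => (pvTy e, e))).foldl (fun d p => d.modify p.1 [] (fun l => l ++ [p.2])) PySem.Dict.empty) by
    rw [List.foldl_map]]
  rw [PySem.Dict.getD_foldl_modify_append]
  rw [List.filter_map]
  simp [PySem.Dict.getD_empty, Function.comp_def]

lemma pvPlain_keys (elems : List (List (String × String))) :
    (pvPlain elems).keys = PySem.Set.ofList (elems.map pvTy) := by
  unfold pvPlain
  rw [PySem.Dict.keys_foldl_modify_key elems pvTy [] (fun _ e => fun l => l ++ [e])]
  simp [PySem.Set.update_nil_left, PySem.Dict.keys_empty]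

lemma pvPlain_nodup (elems : List (List (String × String))) :
    (pvPlain elems).keys.Nodup := by
  unfold pvPlain
  apply PySem.Dict.nodup_keys_foldl_modify_key elems pvTy [] (fun _ e => fun l => l ++ [e])
  simp [PySem.Dict.keys_empty]

lemma pvItems_eq {ν : Type} (d : PySem.Dict String ν) (v0 : ν) (h : d.keys.Nodup) :
    d.items = d.keys.map (fun k => (k, d.getD k v0)) := by
  conv_rhs => rw [PySem.Dict.keys, List.map_map]
  conv_lhs => rw [show d.items = d.items.map (fun p => p) from (List.map_id' d.items).symm]
  apply List.map_congr_left
  intro p hp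
  have : d.getD p.1 v0 = p.2 := PySem.Dict.getD_of_mem_items d (by exact hp) h v0
  simp [Function.comp, this]

lemma pvInner_nat (ss : List (List (String × String))) : ∀ (ps : List (List (String × String)))
    (st : PySem.Dict String String × PySem.Set String),
    (List.range (min ss.length ps.length)).foldl
        (fun st k => pvPair st (ss.getD k []) (ps.getD k [])) st
      = (ss.zip ps).foldl (fun mu sp => pvPair mu sp.1 sp.2) st := by
  induction ss with
  | nil => intro ps st; simp
  | cons a ssr ih =>
    intro ps st
    cases ps with
    | nil => simp
    | cons b psr =>
      simp only [List.length_cons, Nat.succ_min_succ, List.range_succ_eq_map, List.foldl_cons,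
        List.foldl_map, List.zip_cons_cons, List.getD_cons_zero, List.getD_cons_succ]
      exact ih psr (pvPair st a b)

lemma pvInner_eq (ss ps : List (List (String × String)))
    (st : PySem.Dict String String × PySem.Set String) :
    (PySem.List.pyRange 0 (min (ss.length : Int) (ps.length : Int)) 1).foldl
        (fun st i => pvPair st (PySem.List.pyGetD ss i []) (PySem.List.pyGetD ps i [])) st
      = (ss.zip ps).foldl (fun mu sp => pvPair mu sp.1 sp.2) st := by
  rw [PySem.List.pyRange_one, List.foldl_map]
  have hmin : ((min (ss.length : Int) (ps.length : Int)) - 0).toNat = min ss.length ps.length := by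
    omega
  rw [hmin, ← pvInner_nat ss ps st]
  apply PySem.List.foldl_congr_mem
  intro acc k _
  simp [PySem.List.pyGetD_natCast]

lemma pvUpdate_eq_append_new (xs : List String) : ∀ (seen : PySem.Set String),
    PySem.Set.update seen xs = seen ++ pvNew xs seen := by
  induction xs with
  | nil => intro seen; simp [PySem.Set.update, pvNew]
  | cons t r ih =>
    intro seen
    by_cases h : PySem.Set.contains seen t = true
    · have hadd : PySem.Set.add seen t = seen := by
        simp [PySem.Set.add, PySem.Set.contains] at h ⊢; simp [h]
      simp only [PySem.Set.update, List.foldl_cons, hadd, pvNew, h, if_true]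
      exact ih seen
    · have hadd : PySem.Set.add seen t = seen ++ [t] := by
        simp only [PySem.Set.add, h]; simp at h; simp [h]
      simp only [PySem.Set.update, List.foldl_cons, hadd, pvNew, h, if_false]
      rw [show List.foldl PySem.Set.add (seen ++ [t]) r = PySem.Set.update (seen ++ [t]) r from rfl,
        ih (seen ++ [t]), ← hadd, hadd]
      simp

lemma pvOfList_eq_new (xs : List String) :
    PySem.Set.ofList xs = pvNew xs PySem.Set.empty := by
  rw [← PySem.Set.update_nil_left, pvUpdate_eq_append_new]
  simp [PySem.Set.empty]

-- B's streaming fold, with its seen-set, is the pvStep fold over the unseen first occurrences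
lemma pvBfold (s p : List (List (String × String))) (l : List (List (String × String))) :
    ∀ (seen : PySem.Set String) (mu : PySem.Dict String String × PySem.Set String),
    l.foldl
      (fun (st : (PySem.Dict String String × PySem.Set String) × PySem.Set String) e =>
        let t := pvTy e
        if PySem.Set.contains st.2 t || !((pvPlain p).contains t) then (st.1, PySem.Set.add st.2 t)
        else
          (((PySem.List.sorted (s.filter (fun x => pvTy x == t)) pvKey).zip
              (PySem.List.sorted ((pvPlain p).getD t []) pvKey)).foldl
            (fun mu sp => pvPair mu sp.1 sp.2) st.1, PySem.Set.add st.2 t))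
      (mu, seen)
      = ((pvNew (l.map pvTy) seen).foldl (pvStep s p) mu, PySem.Set.update seen (l.map pvTy)) := by
  induction l with
  | nil => intro seen mu; simp [pvNew, PySem.Set.update]
  | cons e r ih =>
    intro seen mu
    by_cases h1 : PySem.Set.contains seen (pvTy e) = true
    · have hadd : PySem.Set.add seen (pvTy e) = seen := by
        simp [PySem.Set.add, PySem.Set.contains] at h1 ⊢; simp [h1]
      simp only [List.foldl_cons, List.map_cons, pvNew, h1, if_true, Bool.true_or, hadd,
        PySem.Set.update, ih]
    · by_cases h2 : (pvPlain p).contains (pvTy e) = true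
      · simp only [List.foldl_cons, List.map_cons, pvNew, h1, h2, Bool.not_true, Bool.or_false,
          if_false, ih, PySem.Set.update, pvStep, Bool.true_eq_false]
        simp [pvStep, h2]
      · simp only [Bool.not_eq_true] at h2
        simp only [List.foldl_cons, List.map_cons, pvNew, h1, h2, Bool.not_false, Bool.or_true,
          if_true, ih, PySem.Set.update, if_false]
        have : pvStep s p mu (pvTy e) = mu := by simp [pvStep, h2]
        simp [this]

theorem match_elements_by_type_and_order_spec : Claim_equal_match_elements_by_type_and_order := by
  intro s p _ _
  unfold Spec_match_elements_by_type_and_order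
  unfold match_elements_by_type_and_order match_elements_by_type_and_order_alt
  simp only [pvGroupA_eq_plain]
  rw [show (p.foldl (fun d e => d.modify (pvTy e) ([] : List (List (String × String))) (fun l => l ++ [e])) PySem.Dict.empty) = pvPlain p from rfl]
  rw [pvBfold s p s PySem.Set.empty (PySem.Dict.empty, PySem.Set.empty)]
  rw [pvItems_eq (pvPlain s) [] (pvPlain_nodup s), pvPlain_keys s, List.foldl_map]
  rw [← pvOfList_eq_new]
  congr 2
  apply PySem.List.foldl_congr_mem
  intro acc t _
  simp only [pvStep, ← pvPlain_getD s t, pvInner_eq]
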